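-- pv_equiv track=rewrite | github.com/Dannyel-05/quant-fund | deepdata/signals/deepdata_signal_engine.py | _bucket_by_ticker
-- ===== SOURCE A (Python) =====
-- def _bucket_by_ticker(all_results: dict, tickers: list) -> dict:
--     """Group all CollectorResults by ticker."""
--     bucket = {t: [] for t in tickers}
--     for module, results in all_results.items():
--         for r in results:
--             t = r.get("ticker")
--             if t in bucket:
--                 bucket[t].append(r)
--     return bucket
-- ===== SOURCE B (Python) =====
-- def _bucket_by_ticker(all_results: dict, tickers: list) -> dict:
--     """Group all CollectorResults by ticker."""
--     return {
--         t: [r for results in all_results.values() for r in results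
--             if r.get("ticker") == t]
--         for t in tickers
--     }
-- ===== Notes on version B (the rewrite author's own statement) =====
-- stated objective: simpler
-- what changed: A does a single stateful pass, pre-seeding empty buckets and appending each result into its bucket behind a membership guard; B is a pure per-ticker scan: for each requested ticker it rescans all results and collects the equal-ticker matches with a nested comprehension (no mutation, no bucket dict).
import Mathlib
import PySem

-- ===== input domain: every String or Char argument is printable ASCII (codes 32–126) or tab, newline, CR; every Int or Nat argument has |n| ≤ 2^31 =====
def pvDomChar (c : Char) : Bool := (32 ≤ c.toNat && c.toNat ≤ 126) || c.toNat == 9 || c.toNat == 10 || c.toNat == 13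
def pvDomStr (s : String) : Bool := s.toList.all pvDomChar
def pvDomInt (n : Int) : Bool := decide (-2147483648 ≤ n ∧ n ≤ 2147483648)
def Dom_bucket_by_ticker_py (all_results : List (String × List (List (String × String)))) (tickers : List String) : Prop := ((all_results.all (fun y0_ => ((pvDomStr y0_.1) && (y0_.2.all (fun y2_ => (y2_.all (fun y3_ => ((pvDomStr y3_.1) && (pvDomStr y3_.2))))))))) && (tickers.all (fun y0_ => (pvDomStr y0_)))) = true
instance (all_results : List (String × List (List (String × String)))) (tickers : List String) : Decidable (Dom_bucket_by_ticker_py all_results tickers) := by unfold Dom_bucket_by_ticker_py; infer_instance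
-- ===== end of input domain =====

-- B replaces A's single stateful bucketing pass (membership-guarded appends into pre-seeded
-- buckets) by a pure per-ticker scan: for each requested ticker, collect the equal-ticker
-- results from a fresh scan of all results (simpler, no mutation; O(T*n) instead of O(n+T)).

-- ===== PORT A =====
-- r.get("ticker"): first-match lookup in the assoc list that represents the result dict r (exact).
def tickerOf (r : List (String × String)) : Option String :=
  (r.find? (fun p => p.1 == "ticker")).map (·.2)

def bucket_by_ticker_py (all_results : List (String × List (List (String × String)))) (tickers : List String) : List (String × List (List (String × String))) :=
  -- bucket = {t: [] for t in tickers}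
  let bucket0 : PySem.Dict String (List (List (String × String))) :=
    tickers.foldl (fun d t => d.insert t []) PySem.Dict.empty
  -- for module, results in all_results.items(): for r in results: t = r.get("ticker"); if t in bucket: bucket[t].append(r)
  let bucket := all_results.foldl
    (fun b mr => mr.2.foldl
      (fun b r =>
        match tickerOf r with
        | some t => if b.contains t then b.modify t [] (fun v => v ++ [r]) else b
        | none => b)   -- t = None: 'None in bucket' is False (every key of bucket is a string)
      b) bucket0
  bucket.items

-- ===== PORT B =====
def bucket_by_ticker_py_alt (all_results : List (String × List (List (String × String)))) (tickers : List String) : List (String × List (List (String × String))) :=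
  -- {t: [r for results in all_results.values() for r in results if r.get("ticker") == t] for t in tickers}
  (tickers.foldl
    (fun d t =>
      d.insert t (all_results.flatMap (fun mr => mr.2.filter (fun r => tickerOf r == some t))))
    PySem.Dict.empty).items

-- ===== PRECONDITION & SPEC =====
def Spec_bucket_by_ticker_py (all_results : List (String × List (List (String × String)))) (tickers : List String) (out : List (String × List (List (String × String)))) : Prop := out = bucket_by_ticker_py_alt all_results tickers
instance (all_results : List (String × List (List (String × String)))) (tickers : List String) (out : List (String × List (List (String × String)))) : Decidable (Spec_bucket_by_ticker_py all_results tickers out) := by unfold Spec_bucket_by_ticker_py; infer_instance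

-- ===== CLAIM (what is proved, stated in full; the proofs are below) =====
def Claim_equal_bucket_by_ticker_py : Prop := ∀ (all_results : List (String × List (List (String × String)))) (tickers : List String), Dom_bucket_by_ticker_py all_results tickers → Spec_bucket_by_ticker_py all_results tickers (bucket_by_ticker_py all_results tickers)

-- ===== LEMMAS AND PROOFS =====

-- A's inner loop body, named for the lemmas below.
def stepA (b : PySem.Dict String (List (List (String × String)))) (r : List (String × String)) : PySem.Dict String (List (List (String × String))) :=
  match tickerOf r with
  | some t => if b.contains t then b.modify t [] (fun v => v ++ [r]) else b
  | none => b

theorem stepA_keys (b : PySem.Dict String (List (List (String × String)))) (r : List (String × String)) :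
    (stepA b r).keys = b.keys := by
  unfold stepA
  cases h : tickerOf r with
  | none => rfl
  | some t =>
    simp only []
    split_ifs with hc
    · rw [PySem.Dict.keys_modify, PySem.Dict.keys_insert_of_contains _ _ hc]
    · rfl

theorem foldA_keys (rs : List (List (String × String))) (b : PySem.Dict String (List (List (String × String)))) :
    (rs.foldl stepA b).keys = b.keys := by
  induction rs generalizing b with
  | nil => rfl
  | cons r rs ih => rw [List.foldl_cons, ih, stepA_keys]

theorem foldA_getD (rs : List (List (String × String))) (b : PySem.Dict String (List (List (String × String)))) (k : String)
    (hk : b.contains k = true) :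
    (rs.foldl stepA b).getD k [] = b.getD k [] ++ rs.filter (fun r => tickerOf r == some k) := by
  induction rs generalizing b with
  | nil => simp
  | cons r rs ih =>
    rw [List.foldl_cons, List.filter_cons]
    have hkeys : (stepA b r).contains k = true := by
      rw [PySem.Dict.contains_iff_mem_keys] at hk ⊢; rw [stepA_keys]; exact hk
    rw [ih _ hkeys]
    unfold stepA
    cases h : tickerOf r with
    | none => simp
    | some t =>
      simp only []
      by_cases hkt : t = k
      · subst hkt
        rw [if_pos hk, PySem.Dict.getD_modify]
        simp
      · have hne : ((some t : Option String) == some k) = false := by simp [hkt]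
        rw [hne]
        simp only [Bool.false_eq_true, if_false]
        split_ifs with hc
        · rw [PySem.Dict.getD_modify, if_neg (fun hkk => hkt hkk.symm)]
        · rfl

-- getD through a fold of inserts whose value depends only on the key.
theorem getD_foldl_insert_fun {ν : Type} (ts : List String) (v : String → ν) (d : PySem.Dict String ν) (k : String) (dflt : ν) :
    (ts.foldl (fun d t => d.insert t (v t)) d).getD k dflt = if k ∈ ts then v k else d.getD k dflt := by
  induction ts generalizing d with
  | nil => simp
  | cons t ts ih =>
    rw [List.foldl_cons, ih, PySem.Dict.getD_insert]
    by_cases hts : k ∈ ts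
    · simp [hts]
    · by_cases hkt : k = t
      · subst hkt; simp [hts]
      · simp [hts, hkt]

theorem keys_foldl_insert_fun {ν : Type} (ts : List String) (v : String → ν) :
    (ts.foldl (fun d t => d.insert t (v t)) (PySem.Dict.empty : PySem.Dict String ν)).keys = PySem.Set.ofList ts := by
  rw [PySem.Dict.keys_foldl_insert ts (fun _ t => v t), PySem.Dict.keys_empty, PySem.Set.update_nil_left]

-- filtering a flatMap = flatMap of the filters (B's per-ticker comprehension vs a filtered flat list).
theorem flatMap_filter_eq (l : List (String × List (List (String × String)))) (p : List (String × String) → Bool) :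
    l.flatMap (fun mr => mr.2.filter p) = (l.flatMap (·.2)).filter p := by
  induction l with
  | nil => rfl
  | cons x xs ih => simp [List.flatMap_cons, List.filter_append, ih]

-- ===== VERDICT (by name: the statement is the Claim_ definition above) =====
theorem bucket_by_ticker_py_spec : Claim_equal_bucket_by_ticker_py := by
  unfold Claim_equal_bucket_by_ticker_py
  intro all_results tickers _
  simp only [Spec_bucket_by_ticker_py, bucket_by_ticker_py, bucket_by_ticker_py_alt]
  set flat := all_results.flatMap (·.2) with hflat
  have hA : all_results.foldl (fun b mr => mr.2.foldl stepA b)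
        (tickers.foldl (fun d t => d.insert t []) PySem.Dict.empty)
      = flat.foldl stepA (tickers.foldl (fun d t => d.insert t []) PySem.Dict.empty) := by
    rw [hflat, List.foldl_flatMap]
  rw [show (fun (b : PySem.Dict String (List (List (String × String)))) (r : List (String × String)) =>
        match tickerOf r with
        | some t => if b.contains t then b.modify t [] (fun v => v ++ [r]) else b
        | none => b) = stepA from rfl]
  rw [hA]
  have hkA : (flat.foldl stepA (tickers.foldl (fun d t => d.insert t []) PySem.Dict.empty)).keys
      = PySem.Set.ofList tickers := by
    rw [foldA_keys, keys_foldl_insert_fun tickers (fun _ => [])]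
  have hkB : (tickers.foldl (fun d t =>
        d.insert t (all_results.flatMap (fun mr => mr.2.filter (fun r => tickerOf r == some t))))
        PySem.Dict.empty).keys = PySem.Set.ofList tickers :=
    keys_foldl_insert_fun tickers _
  rw [PySem.Dict.items_eq_map_keys _ (by rw [hkA]; exact PySem.Set.nodup_ofList tickers) [],
      PySem.Dict.items_eq_map_keys _ (by rw [hkB]; exact PySem.Set.nodup_ofList tickers) [],
      hkA, hkB]
  refine List.map_congr_left (fun k hk => ?_)
  have hkmem : k ∈ tickers := (PySem.Set.mem_ofList tickers k).mp hk
  have hb0 : (tickers.foldl (fun d t => d.insert t ([] : List (List (String × String)))) PySem.Dict.empty).getD k [] = [] := by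
    rw [getD_foldl_insert_fun tickers (fun _ => [])]; split <;> simp
  have hb0c : (tickers.foldl (fun d t => d.insert t ([] : List (List (String × String)))) PySem.Dict.empty).contains k = true := by
    rw [PySem.Dict.contains_iff_mem_keys, keys_foldl_insert_fun tickers (fun _ => [])]
    exact (PySem.Set.mem_ofList tickers k).mpr hkmem
  rw [foldA_getD _ _ _ hb0c, hb0, List.nil_append,
      getD_foldl_insert_fun tickers (fun t => all_results.flatMap (fun mr => mr.2.filter (fun r => tickerOf r == some t))) _ k [],
      if_pos hkmem, flatMap_filter_eq, ← hflat]
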